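-- pv_equiv track=rewrite | github.com/sbrussea/RobinHood-ML-sbrussea | WMA.py | listErrors
-- ===== SOURCE A (Python) =====
-- def listErrors(row, label):
--     errors = set()
--     correct = set()
--     for i in range(len(row)):
--         val = row[i]
--         if int(val) != label:
--             errors.add(i)
--         if int(val) == label:
--             correct.add(i)
--     return errors,correct
-- ===== SOURCE B (Python) =====
-- def listErrors(row, label):
--     # Group indices into a value -> index-set hash index (no comparison against
--     # label inside the loop), then `correct` is one dict lookup and `errors`
--     # are the remaining indices.
--     index = {}
--     for i, v in enumerate(row):
--         index.setdefault(int(v), set()).add(i)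
--     correct = index.get(label, set())
--     errors = {i for i in range(len(row)) if i not in correct}
--     return errors, correct
-- ===== Notes on version B (the rewrite author's own statement) =====
-- stated objective: alternative
-- what changed: B replaces A's per-element equality branching into two sets by a grouping pass that builds a value-to-index-set hash index with setdefault (no comparison against label in the loop), then selects `correct` by a single dict lookup and derives `errors` as the remaining indices.
import Mathlib
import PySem

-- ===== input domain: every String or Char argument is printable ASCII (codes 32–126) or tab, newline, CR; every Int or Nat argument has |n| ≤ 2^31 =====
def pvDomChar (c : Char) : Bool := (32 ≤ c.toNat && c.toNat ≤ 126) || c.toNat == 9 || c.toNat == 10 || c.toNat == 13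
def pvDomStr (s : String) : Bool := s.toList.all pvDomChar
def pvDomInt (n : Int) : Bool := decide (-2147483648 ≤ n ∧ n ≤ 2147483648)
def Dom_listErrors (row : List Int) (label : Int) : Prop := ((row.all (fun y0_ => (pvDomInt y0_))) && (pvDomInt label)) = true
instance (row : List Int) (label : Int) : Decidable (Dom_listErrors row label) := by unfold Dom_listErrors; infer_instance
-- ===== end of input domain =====

-- B groups indices into a value→index-set hash index (no comparison against label in the loop),
-- then `correct` is one dict lookup and `errors` the remaining indices; same values, alternative algorithm.

-- ===== PORT A =====
def listErrors (row : List Int) (label : Int) : List Int × List Int :=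
  (PySem.List.pyRange 0 row.length 1).foldl
    (fun (st : PySem.Set Int × PySem.Set Int) i =>
      let val := PySem.List.pyGetD row i 0
      let st1 := if val ≠ label then (PySem.Set.add st.1 i, st.2) else st
      if val = label then (st1.1, PySem.Set.add st1.2 i) else st1)
    (PySem.Set.empty, PySem.Set.empty)

-- ===== PORT B =====
def listErrors_alt (row : List Int) (label : Int) : List Int × List Int :=
  let index : PySem.Dict Int (PySem.Set Int) :=
    (PySem.List.enumerate row).foldl
      (fun d p => PySem.Dict.modify d p.2 PySem.Set.empty (fun s => PySem.Set.add s p.1))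
      PySem.Dict.empty
  let correct : PySem.Set Int := PySem.Dict.getD index label PySem.Set.empty
  let errors : PySem.Set Int :=
    PySem.Set.ofList ((PySem.List.pyRange 0 row.length 1).filter
      (fun i => !(PySem.Set.contains correct i)))
  (errors, correct)

-- ===== PRECONDITION & SPEC =====
def Spec_listErrors (row : List Int) (label : Int) (out : List Int × List Int) : Prop := out = listErrors_alt row label
instance (row : List Int) (label : Int) (out : List Int × List Int) : Decidable (Spec_listErrors row label out) := by unfold Spec_listErrors; infer_instance

-- ===== CLAIM (what is proved, stated in full; the proofs are below) =====
def Claim_equal_listErrors : Prop := ∀ (row : List Int) (label : Int), Dom_listErrors row label → Spec_listErrors row label (listErrors row label)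

-- ===== LEMMAS AND PROOFS =====

-- A's loop over any duplicate-free index list with fresh accumulators appends the two filtered sublists.
theorem pv_foldA (row : List Int) (label : Int) :
    ∀ (idxs e c : List Int), idxs.Nodup → (∀ x ∈ idxs, x ∉ e ∧ x ∉ c) →
    idxs.foldl
      (fun (st : PySem.Set Int × PySem.Set Int) i =>
        if PySem.List.pyGetD row i 0 = label then
          ((if PySem.List.pyGetD row i 0 ≠ label then (PySem.Set.add st.1 i, st.2) else st).1,
            PySem.Set.add (if PySem.List.pyGetD row i 0 ≠ label then (PySem.Set.add st.1 i, st.2) else st).2 i)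
        else if PySem.List.pyGetD row i 0 ≠ label then (PySem.Set.add st.1 i, st.2) else st)
      (e, c)
    = (e ++ idxs.filter (fun i => !(PySem.List.pyGetD row i 0 == label)),
       c ++ idxs.filter (fun i => PySem.List.pyGetD row i 0 == label)) := by
  intro idxs
  induction idxs with
  | nil => intro e c _ _; simp
  | cons a l ih =>
    intro e c hnd h
    simp only [List.foldl_cons, List.filter_cons]
    by_cases hv : PySem.List.pyGetD row a 0 = label
    · have hstep : (if PySem.List.pyGetD row a 0 = label then
          ((if PySem.List.pyGetD row a 0 ≠ label then (PySem.Set.add e a, c) else (e, c)).1,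
            PySem.Set.add (if PySem.List.pyGetD row a 0 ≠ label then (PySem.Set.add e a, c) else (e, c)).2 a)
        else if PySem.List.pyGetD row a 0 ≠ label then (PySem.Set.add e a, c) else (e, c))
          = (e, c ++ [a]) := by
        simp [hv, PySem.Set.add_of_not_mem (h a (by simp)).2]
      rw [hstep, ih e (c ++ [a]) (List.Nodup.of_cons hnd)]
      · simp [hv]
      · intro x hx
        refine ⟨(h x (by simp [hx])).1, ?_⟩
        simp only [List.mem_append, List.mem_singleton]
        rintro (hc | rfl)
        · exact (h x (by simp [hx])).2 hc
        · exact (List.nodup_cons.mp hnd).1 hx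
    · have hstep : (if PySem.List.pyGetD row a 0 = label then
          ((if PySem.List.pyGetD row a 0 ≠ label then (PySem.Set.add e a, c) else (e, c)).1,
            PySem.Set.add (if PySem.List.pyGetD row a 0 ≠ label then (PySem.Set.add e a, c) else (e, c)).2 a)
        else if PySem.List.pyGetD row a 0 ≠ label then (PySem.Set.add e a, c) else (e, c))
          = (e ++ [a], c) := by
        simp [hv, PySem.Set.add_of_not_mem (h a (by simp)).1]
      rw [hstep, ih (e ++ [a]) c (List.Nodup.of_cons hnd)]
      · simp [hv]
      · intro x hx
        refine ⟨?_, (h x (by simp [hx])).2⟩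
        simp only [List.mem_append, List.mem_singleton]
        rintro (he | rfl)
        · exact (h x (by simp [hx])).1 he
        · exact (List.nodup_cons.mp hnd).1 hx

-- B's grouping loop: over pairs with fresh, duplicate-free first components, every bucket
-- of the resulting index is the old bucket followed by the matching first components in order.
theorem pv_group (ps : List (Int × Int)) :
    ∀ (d : PySem.Dict Int (PySem.Set Int)) (k : Int),
    (ps.map (·.1)).Nodup →
    (∀ p ∈ ps, ∀ k', p.1 ∉ PySem.Dict.getD d k' PySem.Set.empty) →
    PySem.Dict.getD
      (ps.foldl (fun d p => PySem.Dict.modify d p.2 PySem.Set.empty (fun s => PySem.Set.add s p.1)) d)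
      k PySem.Set.empty
    = PySem.Dict.getD d k PySem.Set.empty ++ ((ps.filter (fun p => p.2 == k)).map (·.1)) := by
  induction ps with
  | nil => intro d k _ _; simp
  | cons a l ih =>
    intro d k hnd h
    have hnotmem : a.1 ∉ l.map (·.1) := (List.nodup_cons.mp hnd).1
    have hfresh : ∀ p ∈ l, ∀ k',
        p.1 ∉ PySem.Dict.getD (PySem.Dict.modify d a.2 PySem.Set.empty (fun s => PySem.Set.add s a.1)) k' PySem.Set.empty := by
      intro p hp k'
      rw [PySem.Dict.getD_modify]
      by_cases hkk : k' = a.2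
      · rw [if_pos hkk, PySem.Set.add_of_not_mem (h a (by simp) a.2)]
        intro hmem
        rcases List.mem_append.mp hmem with hm | hm
        · exact h p (by simp [hp]) a.2 hm
        · have hpa : p.1 = a.1 := by simpa using hm
          exact hnotmem (List.mem_map.mpr ⟨p, hp, hpa⟩)
      · rw [if_neg hkk]
        exact h p (by simp [hp]) k'
    rw [List.foldl_cons, ih _ k (by simpa using (List.nodup_cons.mp hnd).2) hfresh,
      PySem.Dict.getD_modify]
    by_cases hk : a.2 = k
    · subst hk
      rw [if_pos rfl, PySem.Set.add_of_not_mem (h a (by simp) a.2)]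
      simp
    · have hbf : (a.2 == k) = false := by simpa using hk
      rw [if_neg (fun hh => hk hh.symm)]
      simp [hbf]

-- the index list range(len(row)) has no duplicates
theorem pv_range_nodup (row : List Int) :
    ((List.range ((row.length : Int) - 0).toNat).map (fun k : Nat => ((0 : Int) + (k : Int)))).Nodup := by
  refine List.Nodup.map ?_ List.nodup_range
  intro a b hab
  simp only at hab
  omega

-- the `correct` bucket of B's index is exactly A's `correct` filter over range(len(row))
theorem pv_correct_eq (row : List Int) (label : Int) :
    PySem.Dict.getD
      ((PySem.List.enumerate row).foldl
        (fun d p => PySem.Dict.modify d p.2 PySem.Set.empty (fun s => PySem.Set.add s p.1))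
        PySem.Dict.empty)
      label PySem.Set.empty
    = (PySem.List.pyRange 0 row.length 1).filter (fun i => PySem.List.pyGetD row i 0 == label) := by
  have hnd : ((PySem.List.enumerate row (0 : Int)).map (·.1)).Nodup := by
    rw [PySem.List.map_fst_enumerate]
    simpa [PySem.List.len_eq, PySem.List.pyRange_one] using pv_range_nodup row
  rw [pv_group _ PySem.Dict.empty label hnd (by simp)]
  rw [PySem.List.enumerate_eq_map_pyRange (d := 0)]
  simp [List.filter_map, List.map_map, Function.comp_def, PySem.List.len_eq]

-- ===== VERDICT (by name: the statement is the Claim_ definition above) =====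
theorem listErrors_spec : Claim_equal_listErrors := by
  intro row label _
  unfold Spec_listErrors listErrors listErrors_alt
  dsimp only
  rw [pv_correct_eq]
  rw [PySem.List.pyRange_one]
  dsimp only [PySem.Set.empty]
  have hnd := pv_range_nodup row
  rw [pv_foldA row label _ [] [] hnd (by simp)]
  simp only [List.nil_append]
  refine Prod.ext ?_ rfl
  rw [PySem.Set.ofList_eq_self_of_nodup _ (List.Nodup.filter _ hnd)]
  refine (List.filter_congr ?_).symm
  intro x hx
  by_cases hv : PySem.List.pyGetD row x 0 = label
  · simp only [PySem.Set.contains_eq_listContains, List.contains_eq_mem, List.mem_filter, hv]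
    simpa using hx
  · simp [List.contains_eq_mem, List.mem_filter, hv]
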